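-- pv_equiv track=rewrite | github.com/Ang107/kyo_pro | CodeChef/143/E/main.py | native
-- ===== SOURCE A (Python) =====
-- def native(n, s):
--     tmp = [s]
--     for i in range(n - 1):
--         if s[i] != s[i + 1]:
--             tmp.append(s[:i] + s[i + 2 :])
--     rslt = min(tmp)
--     if rslt == -1:
--         rslt = s
--     return rslt
-- ===== SOURCE B (Python) =====
-- def native(n, s):
--     # One linear scan: delete at the first differing pair (i, i+1) whose removal
--     # is an immediate improvement (s[i+2] < s[i], or the pair is the suffix);
--     # otherwise delete at the last differing pair and compare with s itself.
--     L = len(s)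
--     last = None
--     for i in range(n - 1):
--         if s[i] != s[i + 1]:
--             last = i
--             if i + 2 >= L or s[i + 2] < s[i]:
--                 return s[:i] + s[i + 2:]
--     if last is None:
--         return s
--     c = s[:last] + s[last + 2:]
--     return c if c < s else s
-- ===== Notes on version B (the rewrite author's own statement) =====
-- stated objective: faster
-- what changed: A materialises every deletion candidate (O(n) strings of length n) and takes min; B does one greedy linear scan that locates the single best deletion position and builds at most one candidate string.
import Mathlib
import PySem

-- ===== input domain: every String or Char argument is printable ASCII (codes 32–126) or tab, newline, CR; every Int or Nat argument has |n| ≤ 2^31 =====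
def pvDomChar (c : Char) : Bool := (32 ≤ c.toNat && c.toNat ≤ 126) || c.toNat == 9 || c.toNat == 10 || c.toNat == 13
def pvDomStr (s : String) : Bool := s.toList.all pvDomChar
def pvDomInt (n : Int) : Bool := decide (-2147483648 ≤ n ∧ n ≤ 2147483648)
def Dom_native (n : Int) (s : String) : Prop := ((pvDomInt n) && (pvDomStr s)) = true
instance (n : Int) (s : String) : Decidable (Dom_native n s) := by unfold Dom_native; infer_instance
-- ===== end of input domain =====

-- B replaces A's "materialise every deletion candidate and take min" (O(n^2)) by one
-- greedy linear scan that locates the single best deletion position (O(n)).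

-- ===== PORT A =====
-- literal port of Source A: build the list [s] ++ all deletions of a differing adjacent
-- pair, take min.  Python's dead branch `if rslt == -1` compares a str with an int,
-- which is always False in Python 3; it is a no-op and is ported as nothing.
def native (n : Int) (s : String) : String :=
  let t := s.toList
  let tmp : List (List Char) :=
    (PySem.List.pyRange 0 (n - 1) 1).foldl
      (fun acc i =>
        if PySem.List.pyGetD t i ' ' ≠ PySem.List.pyGetD t (i + 1) ' ' then
          acc ++ [PySem.List.slice t none (some i) ++ PySem.List.slice t (some (i + 2)) none]
        else acc)
      [t]
  let rslt := (PySem.List.min? tmp (fun x => x)).getD t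
  String.ofList rslt

-- ===== PORT B =====
-- literal port of Source B's single for-loop (early return at the first differing pair
-- whose removal is an immediate improvement; `last` tracks the last differing pair).
def altScan (t : List Char) (L : Nat) (last : Option Nat) : List Nat → List Char
  | [] =>
    match last with
    | none => t
    | some j =>
      let c := t.take j ++ t.drop (j + 2)
      if c < t then c else t
  | i :: rest =>
    if t.getD i ' ' ≠ t.getD (i + 1) ' ' then
      if L ≤ i + 2 ∨ t.getD (i + 2) ' ' < t.getD i ' ' then
        t.take i ++ t.drop (i + 2)
      else altScan t L (some i) rest
    else altScan t L last rest

def native_alt (n : Int) (s : String) : String :=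
  let t := s.toList
  String.ofList (altScan t t.length none (List.range (n - 1).toNat))

-- ===== PRECONDITION & SPEC =====
-- Pre_ excludes exactly the inputs where Source A raises IndexError: it indexes s[i+1]
-- for i up to n-2, so it raises iff n ≥ 2 and n > len(s).
def Pre_native (n : Int) (s : String) : Prop := n ≤ (s.toList.length : Int) ∨ n ≤ 1
instance (n : Int) (s : String) : Decidable (Pre_native n s) := by unfold Pre_native; infer_instance

def pvWitness_native : Int × String := (3, "abc")

def Spec_native (n : Int) (s : String) (out : String) : Prop := out = native_alt n s
instance (n : Int) (s : String) (out : String) : Decidable (Spec_native n s out) := by unfold Spec_native; infer_instance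

-- ===== CLAIM (what is proved, stated in full; the proofs are below) =====
def Claim_equal_native : Prop := ∀ (n : Int) (s : String), Dom_native n s → Pre_native n s → Spec_native n s (native n s)

-- ===== LEMMAS AND PROOFS =====

-- abbreviations for the proofs: the candidate from deleting positions k, k+1,
-- and the Bool test "the adjacent pair at k differs"
def cf (t : List Char) (k : Nat) : List Char := t.take k ++ t.drop (k + 2)
def Pb (t : List Char) (k : Nat) : Bool := decide (t.getD k ' ' ≠ t.getD (k + 1) ' ')

-- lexicographic-order facts about List Char (core < on lists is List.Lex (· < ·))
lemma lex_append_lt (p : List Char) {a b : Char} (u v : List Char) (h : a < b) :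
    p ++ a :: u < p ++ b :: v := by
  induction p with
  | nil => exact List.Lex.rel h
  | cons c p ih => exact List.Lex.cons ih

lemma lex_append_le (p : List Char) {a b : Char} (w : List Char) (h : a ≤ b) :
    p ++ a :: w ≤ p ++ b :: w := by
  rcases lt_or_eq_of_le h with h' | h'
  · exact le_of_lt (lex_append_lt p w w h')
  · subst h'; exact le_refl _

lemma lex_prefix_lt (p : List Char) (a : Char) (u : List Char) : p < p ++ a :: u := by
  induction p with
  | nil => exact List.Lex.nil
  | cons c p ih => exact List.Lex.cons ih

lemma foldl_min_eq {α : Type} [LinearOrder α] (a : α) (l : List α)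
    (h : ∀ y ∈ l, a ≤ y) : l.foldl min a = a := by
  induction l with
  | nil => rfl
  | cons x l ih =>
    rw [List.foldl_cons, min_eq_left (h x (List.mem_cons_self))]
    exact ih (fun y hy => h y (List.mem_cons_of_mem _ hy))

-- deleting at i with s[i+2] < s[i] beats the original string
lemma cand_lt_self (t : List Char) {i : Nat} (h2 : i + 2 < t.length)
    (hlt : t.getD (i + 2) ' ' < t.getD i ' ') : cf t i < t := by
  have hi : i < t.length := by omega
  have ht : t = t.take i ++ t[i] :: t.drop (i + 1) := by
    rw [← List.drop_eq_getElem_cons hi, List.take_append_drop]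
  rw [cf, List.drop_eq_getElem_cons h2]
  conv_rhs => rw [ht]
  exact lex_append_lt _ _ _ (by
    rwa [List.getD_eq_getElem t ' ' h2, List.getD_eq_getElem t ' ' hi] at hlt)

-- deleting the final pair gives a proper prefix, which beats the original string
lemma cand_prefix_lt (t : List Char) {i : Nat} (hi : i < t.length)
    (h2 : t.length ≤ i + 2) : cf t i < t := by
  have ht : t = t.take i ++ t[i] :: t.drop (i + 1) := by
    rw [← List.drop_eq_getElem_cons hi, List.take_append_drop]
  rw [cf, List.drop_eq_nil_of_le h2, List.append_nil]
  conv_rhs => rw [ht]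
  exact lex_prefix_lt _ _ _

-- writing (take k) of t, k > i, with its first i+1 entries exposed
lemma take_split (t : List Char) {i k : Nat} (hik : i < k) (hi : i < t.length) :
    t.take k = t.take i ++ t[i] :: (t.drop (i + 1)).take (k - i - 1) := by
  obtain ⟨d, hd⟩ : ∃ d, k - i = d + 1 := ⟨k - i - 1, by omega⟩
  calc t.take k = t.take i ++ (t.drop i).take (k - i) := by
        rw [← List.take_add]; congr 1; omega
    _ = t.take i ++ (t[i] :: t.drop (i + 1)).take (k - i) := by
        rw [List.drop_eq_getElem_cons hi]
    _ = t.take i ++ t[i] :: (t.drop (i + 1)).take (k - i - 1) := by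
        rw [show k - i - 1 = d from by omega, hd, List.take_succ_cons]

-- an immediately-improving deletion at i beats any deletion at k > i
lemma cand_lt_cand_later (t : List Char) {i k : Nat} (h2 : i + 2 < t.length)
    (hlt : t.getD (i + 2) ' ' < t.getD i ' ') (hik : i < k) : cf t i < cf t k := by
  have hi : i < t.length := by omega
  rw [cf, List.drop_eq_getElem_cons h2, cf, take_split t hik hi, List.append_assoc,
    List.cons_append]
  exact lex_append_lt _ _ _ (by
    rwa [List.getD_eq_getElem t ' ' h2, List.getD_eq_getElem t ' ' hi] at hlt)

-- the chain step: if the differing pair at j is not an immediate improvement and no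
-- pair differs strictly between j and i, then deleting at i is at least as good
lemma chain_step (t : List Char) {j i : Nat} (hij : j < i) (hiL : i + 1 < t.length)
    (hPj : t.getD j ' ' ≠ t.getD (j + 1) ' ')
    (hnc : ¬(t.length ≤ j + 2 ∨ t.getD (j + 2) ' ' < t.getD j ' '))
    (hbet : ∀ k, j < k → k < i → t.getD k ' ' = t.getD (k + 1) ' ') :
    cf t i ≤ cf t j := by
  rw [not_or] at hnc
  obtain ⟨hj2n, hlen⟩ := hnc
  have hj2' : j + 2 < t.length := by omega
  have hle : t.getD j ' ' ≤ t.getD (j + 2) ' ' := not_lt.mp hlen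
  have hj : j < t.length := by omega
  rcases Nat.eq_or_lt_of_le hij with heq | hlt'
  · -- i = j + 1 : the two candidates share take j and the tail drop (j+3)
    subst heq
    rw [cf, cf, List.drop_eq_getElem_cons hj2',
      List.take_add_one, List.getElem?_eq_getElem hj]
    show t.take j ++ [t[j]] ++ t.drop (j + 3) ≤ _
    rw [List.append_assoc, List.singleton_append]
    exact lex_append_le _ _ (by
      rwa [List.getD_eq_getElem t ' ' hj, List.getD_eq_getElem t ' ' hj2'] at hle)
  · -- j + 1 < i : strictly, t[j] < t[j+1] = t[j+2], and cf t i starts take j ++ t[j] :: …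
    have hrun : t.getD (j + 1) ' ' = t.getD (j + 2) ' ' := hbet (j + 1) (by omega) (by omega)
    have hstrict : t.getD j ' ' < t.getD (j + 2) ' ' :=
      lt_of_le_of_ne hle (by rw [← hrun]; exact hPj)
    rw [cf, cf, List.drop_eq_getElem_cons hj2', take_split t hij hj, List.append_assoc,
      List.cons_append]
    exact le_of_lt (lex_append_lt _ _ _ (by
      rwa [List.getD_eq_getElem t ' ' hj, List.getD_eq_getElem t ' ' hj2'] at hstrict))

-- the main loop invariant: the greedy scan over any index suffix computes the
-- running minimum of the original string / candidate deletions of that suffix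
lemma comb (t : List Char) : ∀ (m i : Nat) (last : Option Nat),
    i + m + 1 ≤ t.length →
    (∀ j, last = some j → j < i ∧ t.getD j ' ' ≠ t.getD (j + 1) ' ' ∧
        ¬(t.length ≤ j + 2 ∨ t.getD (j + 2) ' ' < t.getD j ' ') ∧
        ∀ k, j < k → k < i → t.getD k ' ' = t.getD (k + 1) ' ') →
    altScan t t.length last (List.range' i m)
      = (((List.range' i m).filter (Pb t)).map (cf t)).foldl min
          (match last with | none => t | some j => min t (cf t j)) := by
  intro m
  induction m with
  | zero =>
    intro i last _ hinv
    cases last with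
    | none => simp [altScan]
    | some j =>
      simp only [List.range'_zero, List.filter_nil, List.map_nil, List.foldl_nil, altScan, cf]
      by_cases h : t.take j ++ t.drop (j + 2) < t
      · rw [if_pos h, min_eq_right h.le]
      · rw [if_neg h, min_eq_left (not_lt.mp h)]
  | succ m ih =>
    intro i last hbound hinv
    rw [List.range'_succ]
    by_cases hP : t.getD i ' ' ≠ t.getD (i + 1) ' '
    · have hPb : Pb t i = true := decide_eq_true hP
      simp only [altScan, if_pos hP, List.filter_cons, hPb, if_true, List.map_cons,
        List.foldl_cons]
      by_cases hc : t.length ≤ i + 2 ∨ t.getD (i + 2) ' ' < t.getD i ' '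
      · rw [if_pos hc]
        by_cases hL2 : t.length ≤ i + 2
        · -- the deleted pair is the final pair; no further loop indices exist
          have hm : m = 0 := by omega
          subst hm
          have hi : i < t.length := by omega
          have hpre : cf t i < t := cand_prefix_lt t hi hL2
          simp only [List.range'_zero, List.filter_nil, List.map_nil, List.foldl_nil]
          cases last with
          | none => rw [min_eq_right hpre.le]; rfl
          | some j =>
            obtain ⟨h1, h2', h3, h4⟩ := hinv j rfl
            rw [min_eq_right (le_min hpre.le (chain_step t h1 (by omega) h2' h3 h4))]; rfl
        · -- an immediately-improving deletion: it beats everything that follows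
          have hlt := hc.resolve_left hL2
          have h2 : i + 2 < t.length := by omega
          have hself : cf t i < t := cand_lt_self t h2 hlt
          have hlater : ∀ y ∈ List.map (cf t) (List.filter (Pb t) (List.range' (i + 1) m)),
              cf t i ≤ y := by
            intro y hy
            obtain ⟨k, hk, rfl⟩ := List.mem_map.mp hy
            have hk1 : k ∈ List.range' (i + 1) m := (List.mem_filter.mp hk).1
            have : i + 1 ≤ k := (List.mem_range'_1.mp hk1).1
            exact (cand_lt_cand_later t h2 hlt (by omega)).le
          cases last with
          | none => rw [min_eq_right hself.le, foldl_min_eq _ _ hlater]; rfl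
          | some j =>
            obtain ⟨h1, h2', h3, h4⟩ := hinv j rfl
            rw [min_eq_right (le_min hself.le (chain_step t h1 (by omega) h2' h3 h4)),
              foldl_min_eq _ _ hlater]
            rfl
      · rw [if_neg hc]
        have hinv' : ∀ j, (some i : Option Nat) = some j → j < i + 1 ∧
            t.getD j ' ' ≠ t.getD (j + 1) ' ' ∧
            ¬(t.length ≤ j + 2 ∨ t.getD (j + 2) ' ' < t.getD j ' ') ∧
            ∀ k, j < k → k < i + 1 → t.getD k ' ' = t.getD (k + 1) ' ' := by
          intro j hj
          injection hj with hj
          subst hj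
          exact ⟨Nat.lt_succ_self i, hP, hc, fun k hk1 hk2 => absurd hk1 (by omega)⟩
        cases last with
        | none => exact ih (i + 1) (some i) (by omega) hinv'
        | some j =>
          obtain ⟨ha, hb, hcn, hd⟩ := hinv j rfl
          have hij : cf t i ≤ cf t j := chain_step t ha (by omega) hb hcn hd
          rw [min_assoc, min_eq_right hij]
          exact ih (i + 1) (some i) (by omega) hinv'
    · have hPb : Pb t i = false := decide_eq_false hP
      have he : t.getD i ' ' = t.getD (i + 1) ' ' := not_not.mp hP
      simp only [altScan, if_neg hP, List.filter_cons, hPb, Bool.false_eq_true, if_false]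
      exact ih (i + 1) last (by omega)
        (by
          intro j hj
          obtain ⟨h1, h2, h3, h4⟩ := hinv j hj
          refine ⟨by omega, h2, h3, fun k hk1 hk2 => ?_⟩
          by_cases hki : k < i
          · exact h4 k hk1 hki
          · have : k = i := by omega
            subst this; exact he)

-- A's value, normalised: min of the original and all candidate deletions
lemma native_eq (n : Int) (s : String) (hn2 : 2 ≤ n) :
    native n s = String.ofList
      ((((List.range (n - 1).toNat).filter (Pb s.toList)).map (cf s.toList)).foldl
        min s.toList) := by
  simp only [native]
  have hcast : n - 1 = (((n - 1).toNat : Nat) : Int) := by omega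
  rw [hcast, PySem.List.pyRange_zero_natCast,
    PySem.List.foldl_append_ite
      (fun i => PySem.List.pyGetD s.toList i ' ' ≠ PySem.List.pyGetD s.toList (i + 1) ' ')
      (fun i => PySem.List.slice s.toList none (some i) ++
        PySem.List.slice s.toList (some (i + 2)) none),
    List.filter_map, List.map_map]
  have hfil : List.filter
      ((fun x => decide (PySem.List.pyGetD s.toList x ' ' ≠ PySem.List.pyGetD s.toList (x + 1) ' '))
        ∘ (fun k : Nat => (k : Int))) (List.range (n - 1).toNat)
      = List.filter (Pb s.toList) (List.range (n - 1).toNat) := by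
    apply List.filter_congr
    intro k _
    simp only [Function.comp, Pb]
    rw [decide_eq_decide]
    rw [PySem.List.pyGetD_natCast, show ((k : Int) + 1) = ((k + 1 : Nat) : Int) by push_cast; ring,
      PySem.List.pyGetD_natCast]
  rw [hfil]
  have hmap : ∀ l : List Nat, List.map
      ((fun i => PySem.List.slice s.toList none (some i) ++
        PySem.List.slice s.toList (some (i + 2)) none) ∘ (fun k : Nat => (k : Int))) l
      = List.map (cf s.toList) l := by
    intro l
    apply List.map_congr_left
    intro k _
    simp only [Function.comp, cf]
    rw [PySem.List.slice_to_natCast, show ((k : Int) + 2) = ((k + 2 : Nat) : Int) by push_cast; ring,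
      PySem.List.slice_from_natCast]
  rw [hmap]
  have hmin : PySem.List.min?
      (s.toList :: List.map (cf s.toList) (List.filter (Pb s.toList) (List.range (n - 1).toNat)))
      (fun x => x)
      = some ((List.map (cf s.toList) (List.filter (Pb s.toList) (List.range (n - 1).toNat))).foldl
          min s.toList) := by
    convert PySem.List.min?_id_cons s.toList _ using 2
  rw [List.singleton_append, hmin, Option.getD_some]
  simp only [Int.toNat_natCast]

lemma native_triv (n : Int) (s : String) (hn : n ≤ 1) :
    native n s = String.ofList s.toList := by
  simp only [native]
  have hnil : PySem.List.pyRange 0 (n - 1) 1 = [] := by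
    simp [PySem.List.pyRange]
    omega
  rw [hnil, List.foldl_nil]
  have hmin : PySem.List.min? [s.toList] (fun x : List Char => x)
      = some (([] : List (List Char)).foldl min s.toList) := by
    convert PySem.List.min?_id_cons s.toList [] using 2
  rw [hmin]
  rfl

-- ===== VERDICT (by name: the statement is the Claim_ definition above) =====
theorem native_spec : Claim_equal_native := by
  intro n s _ hpre
  unfold Spec_native
  by_cases hn : n ≤ 1
  · rw [native_triv n s hn]
    have h0 : (n - 1).toNat = 0 := by omega
    simp [native_alt, h0, altScan]
  · have hn2 : 2 ≤ n := by omega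
    have hnL : n ≤ (s.toList.length : Int) := by
      rcases hpre with h | h
      · exact h
      · omega
    rw [native_eq n s hn2]
    show _ = String.ofList (altScan s.toList s.toList.length none (List.range (n - 1).toNat))
    rw [List.range_eq_range',
      comb s.toList (n - 1).toNat 0 none (by omega) (by intro j h; cases h)]
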